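-- pv_equiv track=rewrite | github.com/dcschenc/myleetcode | 1503-reducing-dishes/1503-reducing-dishes.py | maxSatisfaction
-- ===== SOURCE A (Python) =====
-- from typing import List
--
-- def maxSatisfaction(satisfaction: List[int]) -> int:
--     # https://github.com/doocs/leetcode/tree/main/solution/1400-1499/1402.Reducing%20Dishes
--     satisfaction.sort(reverse=True)
--     ans = s = 0
--     for x in satisfaction:
--         s += x
--         if s <= 0:
--             break
--         ans += s
--     return ans
-- ===== SOURCE B (Python) =====
-- from typing import List
--
-- def maxSatisfaction(satisfaction: List[int]) -> int:
--     satisfaction.sort(reverse=True)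
--     n = len(satisfaction)
--     best = 0
--     for m in range(1, n + 1):
--         total = 0
--         for i in range(m):
--             total += (m - i) * satisfaction[i]
--         best = max(best, total)
--     return best
-- ===== Notes on version B (the rewrite author's own statement) =====
-- stated objective: alternative
-- what changed: Replaces the greedy single-pass prefix-sum loop with early break by a brute-force enumeration: for every number m of kept dishes compute the time-coefficient total with an inner loop and take the maximum.
import Mathlib
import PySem

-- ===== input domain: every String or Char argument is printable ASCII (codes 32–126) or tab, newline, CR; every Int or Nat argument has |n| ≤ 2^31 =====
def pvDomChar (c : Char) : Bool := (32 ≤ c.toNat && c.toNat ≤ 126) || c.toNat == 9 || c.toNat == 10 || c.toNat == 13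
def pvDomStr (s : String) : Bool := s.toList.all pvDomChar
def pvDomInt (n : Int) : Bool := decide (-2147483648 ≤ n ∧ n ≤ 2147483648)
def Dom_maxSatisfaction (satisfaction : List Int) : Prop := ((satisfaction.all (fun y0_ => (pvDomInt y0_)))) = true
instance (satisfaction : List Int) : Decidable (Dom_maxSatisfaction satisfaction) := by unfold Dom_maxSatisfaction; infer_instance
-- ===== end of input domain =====

-- B replaces A's greedy break-early prefix-sum pass by a brute-force enumeration of the number m of
-- kept dishes (max over all m of the time-coefficient total); equivalence is about the RETURN value —
-- both A and B sort the argument descending in place.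

-- ===== PORT A =====
-- the 'for x in satisfaction: s += x; if s <= 0: break; ans += s' loop, state (ans, s)
def pvALoop : List Int → Int → Int → Int
  | [], ans, _ => ans
  | x :: xs, ans, s =>
      if s + x ≤ 0 then ans else pvALoop xs (ans + (s + x)) (s + x)

def maxSatisfaction (satisfaction : List Int) : Int :=
  pvALoop (PySem.List.sorted satisfaction (fun v => v) true) 0 0

-- ===== PORT B =====
def maxSatisfaction_alt (satisfaction : List Int) : Int :=
  let l := PySem.List.sorted satisfaction (fun v => v) true
  let n : Int := l.length
  (PySem.List.pyRange 1 (n + 1) 1).foldl (fun best m =>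
    let total := (PySem.List.pyRange 0 m 1).foldl
      (fun t i => t + (m - i) * PySem.List.pyGetD l i 0) 0
    max best total) 0

-- ===== PRECONDITION & SPEC =====
def Spec_maxSatisfaction (satisfaction : List Int) (out : Int) : Prop := out = maxSatisfaction_alt satisfaction
instance (satisfaction : List Int) (out : Int) : Decidable (Spec_maxSatisfaction satisfaction out) := by unfold Spec_maxSatisfaction; infer_instance

-- ===== CLAIM (what is proved, stated in full; the proofs are below) =====
def Claim_equal_maxSatisfaction : Prop := ∀ (satisfaction : List Int), Dom_maxSatisfaction satisfaction → Spec_maxSatisfaction satisfaction (maxSatisfaction satisfaction)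

-- ===== LEMMAS AND PROOFS =====

-- pvT l s m: the time-coefficient total of the first m dishes of l, with every coefficient offset by s
-- (s stands for the prefix sum already accumulated before reaching l).
def pvT (l : List Int) (s : Int) (m : Nat) : Int :=
  (List.range m).foldl (fun t (j : Nat) => t + ((m : Int) - (j : Int)) * l.getD j 0) 0 + m * s

-- pvMx l s: max of 0 and pvT l s m over m = 1 .. length l
def pvMx (l : List Int) (s : Int) : Int :=
  (List.range l.length).foldl (fun b k => max b (pvT l s (k + 1))) 0

theorem pvT_zero (l : List Int) (s : Int) : pvT l s 0 = 0 := by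
  simp [pvT]

theorem pvT_succ (x : Int) (xs : List Int) (s : Int) (m : Nat) :
    pvT (x :: xs) s (m + 1) = (s + x) + pvT xs (s + x) m := by
  unfold pvT
  rw [PySem.List.foldl_add, PySem.List.foldl_add]
  rw [List.range_succ_eq_map, List.map_cons, List.map_map, List.sum_cons]
  have hmap : (List.range m).map ((fun (j : Nat) => (((m + 1 : Nat) : Int) - (j : Int)) * (x :: xs).getD j 0) ∘ Nat.succ)
       = (List.range m).map (fun (j : Nat) => ((m : Int) - (j : Int)) * xs.getD j 0) := by
    apply List.map_congr_left
    intro k _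
    simp only [Function.comp, List.getD_cons_succ]
    push_cast
    ring_nf
  rw [hmap]
  simp only [List.getD_cons_zero]
  push_cast
  ring

theorem pvMx_nil (s : Int) : pvMx [] s = 0 := rfl

theorem pvMx_cons (x : Int) (xs : List Int) (s : Int) :
    pvMx (x :: xs) s = max 0 ((s + x) + pvMx xs (s + x)) := by
  have H2 : ∀ (L : List Nat) (h : Nat → Int) (a b : Int),
      L.foldl (fun acc k => max acc (h k)) (max a b) = max a (L.foldl (fun acc k => max acc (h k)) b) := by
    intro L h
    induction L with
    | nil => intro a b; rfl
    | cons y ys ih =>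
        intro a b
        simp only [List.foldl_cons, max_assoc]
        exact ih a _
  have H1 : ∀ (L : List Nat) (c : Int) (g : Nat → Int) (b0 : Int),
      L.foldl (fun b k => max b (c + g k)) (c + b0) = c + L.foldl (fun b k => max b (g k)) b0 := by
    intro L c g
    induction L with
    | nil => intro b0; rfl
    | cons y ys ih =>
        intro b0
        simp only [List.foldl_cons, max_add_add_left]
        exact ih _
  unfold pvMx
  simp only [List.length_cons]
  rw [List.range_succ_eq_map, List.foldl_cons, List.foldl_map]
  have hfun : ∀ (b : Int), ∀ k ∈ List.range xs.length,
      (fun (b : Int) (k : Nat) => max b (pvT (x :: xs) s (Nat.succ k + 1))) b k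
      = (fun (b : Int) (k : Nat) => max b ((s + x) + pvT xs (s + x) (k + 1))) b k := by
    intro b k _
    simp only
    rw [show Nat.succ k + 1 = (k + 1) + 1 from rfl, pvT_succ]
  rw [PySem.List.foldl_congr_mem _ _ _ _ hfun]
  rw [show pvT (x :: xs) s (0 + 1) = (s + x) + pvT xs (s + x) 0 from pvT_succ x xs s 0,
     pvT_zero, add_zero]
  rw [H2 (List.range xs.length) (fun k => (s + x) + pvT xs (s + x) (k + 1)) 0 (s + x)]
  have h1 := H1 (List.range xs.length) (s + x) (fun k => pvT xs (s + x) (k + 1)) 0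
  rw [add_zero] at h1
  rw [h1]

theorem pvMx_nonneg (l : List Int) (s : Int) : 0 ≤ pvMx l s := by
  cases l with
  | nil => simp [pvMx_nil]
  | cons x xs => rw [pvMx_cons]; exact le_max_left _ _

theorem pvMx_nonpos (l : List Int) : ∀ s : Int, s ≤ 0 → (∀ y ∈ l, y ≤ 0) → s + pvMx l s ≤ 0 := by
  induction l with
  | nil => intro s hs _; simpa [pvMx_nil] using hs
  | cons y ys ih =>
      intro s hs hall
      rw [pvMx_cons]
      have hy : y ≤ 0 := hall y List.mem_cons_self
      have hsy : s + y ≤ 0 := by omega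
      have h2 : (s + y) + pvMx ys (s + y) ≤ 0 :=
        ih (s + y) hsy (fun z hz => hall z (List.mem_cons_of_mem _ hz))
      rw [max_eq_left h2]
      omega

theorem pvALoop_add (l : List Int) : ∀ ans s : Int, pvALoop l ans s = ans + pvALoop l 0 s := by
  induction l with
  | nil => intro ans s; simp [pvALoop]
  | cons x xs ih =>
      intro ans s
      simp only [pvALoop]
      split_ifs with h
      · ring
      · rw [ih (ans + (s + x)), ih (0 + (s + x))]; ring

theorem pvALoop_eq_pvMx (l : List Int) (hp : l.Pairwise (fun a b => b ≤ a)) :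
    ∀ s : Int, 0 ≤ s → pvALoop l 0 s = pvMx l s := by
  induction l with
  | nil => intro s _; rfl
  | cons x xs ih =>
      rcases List.pairwise_cons.mp hp with ⟨hx, hxs⟩
      intro s hs
      simp only [pvALoop]
      rw [pvMx_cons]
      split_ifs with h
      · -- break: s + x ≤ 0, so x ≤ 0 and all of xs ≤ x ≤ 0
        have hx0 : x ≤ 0 := by omega
        have hall : ∀ y ∈ xs, y ≤ 0 := fun y hy => le_trans (hx y hy) hx0
        have := pvMx_nonpos xs (s + x) h hall
        omega
      · -- continue: s + x > 0
        rw [pvALoop_add, ih hxs (s + x) (by omega)]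
        have := pvMx_nonneg xs (s + x)
        have hmax : max 0 ((s + x) + pvMx xs (s + x)) = (s + x) + pvMx xs (s + x) :=
          max_eq_right (by omega)
        rw [hmax]
        ring

-- B's port computes pvMx of the sorted list at offset 0
theorem alt_eq_pvMx (sat : List Int) :
    maxSatisfaction_alt sat = pvMx (PySem.List.sorted sat (fun v => v) true) 0 := by
  unfold maxSatisfaction_alt
  set l := PySem.List.sorted sat (fun v => v) true with hl
  show (PySem.List.pyRange 1 ((l.length : Int) + 1) 1).foldl (fun best m =>
      max best ((PySem.List.pyRange 0 m 1).foldl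
        (fun t i => t + (m - i) * PySem.List.pyGetD l i 0) 0)) 0 = pvMx l 0
  rw [PySem.List.pyRange_one 1 ((l.length : Int) + 1)]
  have hlen : (((l.length : Int) + 1) - 1).toNat = l.length := by omega
  rw [hlen, List.foldl_map]
  unfold pvMx
  apply PySem.List.foldl_congr_mem
  intro b k _
  congr 1
  -- inner loop: total over range(m) with m = 1 + k equals pvT l 0 (k+1)
  rw [PySem.List.pyRange_one 0 (1 + (k : Int))]
  have hk : ((1 + (k : Int)) - 0).toNat = k + 1 := by omega
  rw [hk, List.foldl_map]
  unfold pvT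
  have : ∀ (t : Int), ∀ j ∈ List.range (k + 1),
      (fun (t : Int) (j : Nat) => t + ((1 + (k : Int)) - ((0 : Int) + (j : Int))) * PySem.List.pyGetD l ((0 : Int) + (j : Int)) 0) t j
      = (fun (t : Int) (j : Nat) => t + (((k + 1 : Nat) : Int) - (j : Int)) * l.getD j 0) t j := by
    intro t j _
    simp only [zero_add, PySem.List.pyGetD_natCast]
    push_cast
    ring_nf
  rw [PySem.List.foldl_congr_mem _ _ _ _ this, mul_zero, add_zero]

-- ===== VERDICT (by name: the statement is the Claim_ definition above) =====
theorem maxSatisfaction_spec : Claim_equal_maxSatisfaction := by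
  intro sat _
  unfold Spec_maxSatisfaction
  rw [alt_eq_pvMx]
  unfold maxSatisfaction
  exact pvALoop_eq_pvMx _ (PySem.List.sorted_pairwise_rev sat (fun v => v)) 0 le_rfl
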